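-- pv_equiv track=rewrite | github.com/jps531/ms-hs-football-playoff-engine | prefect/region_scenarios_pipeline.py | consolidate_opposites_and_remove_bases
-- ===== SOURCE A (Python) =====
-- from typing import Dict, List, Tuple, Optional
--
-- def consolidate_opposites_and_remove_bases(candidate_minterms: List[Dict[str, bool]]) -> List[Dict[str, bool]]:
--     """
--     1. Consolidate dictionaries that are identical except for one key whose
--        boolean values are opposite — removing that differing key.
--     2. Remove any base keys (e.g., 'A>B') when a GE variant (e.g., 'A>B_GE1') exists.
--     """
--     # --- Step 1: consolidate opposite pairs ---
--     consolidated = []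
--     used = set()
--
--     for i, d1 in enumerate(candidate_minterms):
--         if i in used:
--             continue
--         merged = False
--         for j, d2 in enumerate(candidate_minterms[i+1:], start=i+1):
--             if j in used:
--                 continue
--             if set(d1.keys()) != set(d2.keys()):
--                 continue
--             differing = [k for k in d1 if d1[k] != d2[k]]
--             if len(differing) == 1:
--                 new_dict = {k: v for k, v in d1.items() if k != differing[0]}
--                 consolidated.append(new_dict)
--                 used.update({i, j})
--                 merged = True
--                 break
--         if not merged:
--             consolidated.append(d1)
--
--     # --- Step 2: remove base keys when GE variants exist ---
--     cleaned = []
--     for d in consolidated: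
--         ge_bases = {k.split('_GE')[0] for k in d if '_GE' in k}
--         new_d = {k: v for k, v in d.items() if k.split('_GE')[0] not in ge_bases or '_GE' in k}
--         cleaned.append(new_d)
--
--     return cleaned
-- ===== SOURCE B (Python) =====
-- from typing import Dict, List, Tuple, Optional
--
--
-- def _one_diff_key(d1: Dict[str, bool], d2: Dict[str, bool]) -> Optional[str]:
--     """The single key on which d1 and d2 disagree, if their key sets match and
--     exactly one value differs; otherwise None (early exit on a second difference)."""
--     if d1.keys() != d2.keys():
--         return None
--     diff = None
--     for k in d1:
--         if d1[k] != d2[k]: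
--             if diff is not None:
--                 return None
--             diff = k
--     return diff
--
--
-- def _extract_partner(d1, rest):
--     """First dict in rest that is an opposite-in-one-literal partner of d1:
--     returns (differing key, rest without that partner), or (None, rest)."""
--     out = []
--     it = iter(rest)
--     for d2 in it:
--         k = _one_diff_key(d1, d2)
--         if k is not None:
--             out.extend(it)
--             return k, out
--         out.append(d2)
--     return None, out
--
--
-- def _strip_ge_bases(d: Dict[str, bool]) -> Dict[str, bool]:
--     ge_bases = {k.split('_GE')[0] for k in d if '_GE' in k}
--     return {k: v for k, v in d.items() if '_GE' in k or k.split('_GE')[0] not in ge_bases}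
--
--
-- def consolidate_opposites_and_remove_bases(candidate_minterms: List[Dict[str, bool]]) -> List[Dict[str, bool]]:
--     result = []
--     rest = list(candidate_minterms)
--     while rest:
--         d1, rest = rest[0], rest[1:]
--         k, rest = _extract_partner(d1, rest)
--         if k is None:
--             result.append(_strip_ge_bases(d1))
--         else:
--             result.append(_strip_ge_bases({kk: v for kk, v in d1.items() if kk != k}))
--     return result
-- ===== Notes on version B (the rewrite author's own statement) =====
-- stated objective: alternative
-- what changed: Replaces A's index-based double loop with a `used` index set and a separate second cleanup pass by a worklist that pops the head, extracts its first one-opposite partner with a single early-exit key scan, and strips _GE base keys in the same pass.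
import Mathlib
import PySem

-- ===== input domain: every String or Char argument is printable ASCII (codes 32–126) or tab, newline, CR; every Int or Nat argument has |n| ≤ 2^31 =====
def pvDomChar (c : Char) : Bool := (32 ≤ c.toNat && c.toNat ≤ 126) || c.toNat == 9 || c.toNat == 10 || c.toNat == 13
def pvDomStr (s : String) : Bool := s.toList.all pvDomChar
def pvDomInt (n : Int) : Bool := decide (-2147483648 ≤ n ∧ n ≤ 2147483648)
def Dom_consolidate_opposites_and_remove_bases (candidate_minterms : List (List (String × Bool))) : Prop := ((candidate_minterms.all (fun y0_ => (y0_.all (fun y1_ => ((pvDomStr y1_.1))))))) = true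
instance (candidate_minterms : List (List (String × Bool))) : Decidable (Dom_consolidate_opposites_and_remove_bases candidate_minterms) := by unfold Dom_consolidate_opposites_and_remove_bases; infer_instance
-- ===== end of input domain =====

-- B restructures A: instead of index loops over the whole list with a `used` index set and a
-- separate second cleanup pass, B pops the head of a worklist, extracts its first one-opposite
-- partner with a single early-exit key scan, and strips _GE base keys in the same pass
-- (objective: alternative).

-- ===== PORT A =====
-- Shared dict-expression helpers (the same Python expressions occur in both programs):
-- keyset d = set(d.keys()); dGet d k = d[k] (first match; only evaluated under key-set equality, so
-- no KeyError is reachable and the `false` default never fires); splitGE0 k = k.split('_GE')[0]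
-- (split by a non-empty separator is a non-empty list, so the `[]`/`""` defaults never fire).
def keyset (d : List (String × Bool)) : PySem.Set String := PySem.Set.ofList (d.map Prod.fst)
def dGet (d : List (String × Bool)) (k : String) : Bool := ((d.find? (fun p => p.1 == k)).map Prod.snd).getD false
def splitGE0 (k : String) : String := ((PySem.Str.split? k "_GE").getD []).headD ""

-- differing = [k for k in d1 if d1[k] != d2[k]]
def differingA (d1 d2 : List (String × Bool)) : List String :=
  (d1.map Prod.fst).filter (fun k => dGet d1 k != dGet d2 k)

-- inner loop: for j, d2 in enumerate(candidate_minterms[i+1:], start=i+1): … break on first merge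
def innerScanA (used : PySem.Set Int) (d1 : List (String × Bool)) : Nat → List (List (String × Bool)) → Option (Nat × String)
  | _, [] => none
  | j, d2 :: rest =>
    if PySem.Set.contains used (j : Int) then innerScanA used d1 (j+1) rest
    else if !(PySem.Set.equal (keyset d1) (keyset d2)) then innerScanA used d1 (j+1) rest
    else match differingA d1 d2 with
      | [k] => some (j, k)
      | _ => innerScanA used d1 (j+1) rest

-- outer loop of step 1, carrying the running `used` set of already-consumed indices
def outerA : Nat → List (List (String × Bool)) → PySem.Set Int → List (List (String × Bool))
  | _, [], _ => []
  | i, d1 :: rest, used =>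
    if PySem.Set.contains used (i : Int) then outerA (i+1) rest used
    else match innerScanA used d1 (i+1) rest with
      | some (j, k) => (d1.filter (fun p => p.1 != k)) :: outerA (i+1) rest (PySem.Set.add (PySem.Set.add used (i : Int)) (j : Int))
      | none => d1 :: outerA (i+1) rest used

-- step 2: remove base keys when a _GE variant exists
def cleanA (d : List (String × Bool)) : List (String × Bool) :=
  let ge_bases : PySem.Set String := PySem.Set.ofList (((d.map Prod.fst).filter (fun k => PySem.Str.isIn "_GE" k)).map splitGE0)
  d.filter (fun p => !(PySem.Set.contains ge_bases (splitGE0 p.1)) || PySem.Str.isIn "_GE" p.1)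

def consolidate_opposites_and_remove_bases (candidate_minterms : List (List (String × Bool))) : List (List (String × Bool)) :=
  (outerA 0 candidate_minterms PySem.Set.empty).map cleanA

-- ===== PORT B =====
-- _one_diff_key: early-exit scan of d1's keys; None on key-set mismatch, zero or ≥ 2 differences
def oneDiffGo (d1 d2 : List (String × Bool)) : List String → Option String → Option String
  | [], diff => diff
  | k :: ks, diff =>
    if dGet d1 k != dGet d2 k then
      match diff with
      | some _ => none
      | none => oneDiffGo d1 d2 ks (some k)
    else oneDiffGo d1 d2 ks diff

def oneDiffKey (d1 d2 : List (String × Bool)) : Option String :=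
  if !(PySem.Set.equal (keyset d1) (keyset d2)) then none
  else oneDiffGo d1 d2 (d1.map Prod.fst) none

-- _extract_partner: first partner of d1 in the worklist, returned with the rest of the list
def extractGo (d1 : List (String × Bool)) : List (List (String × Bool)) → List (List (String × Bool)) → Option String × List (List (String × Bool))
  | out, [] => (none, out)
  | out, d2 :: rest =>
    match oneDiffKey d1 d2 with
    | some k => (some k, out ++ rest)
    | none => extractGo d1 (out ++ [d2]) rest

-- this bound justifies termination of the worklist loop below
lemma extractGo_len (d1 : List (String × Bool)) (out : List (List (String × Bool))) (l : List (List (String × Bool))) :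
    ((extractGo d1 out l).2).length ≤ out.length + l.length := by
  induction l generalizing out with
  | nil => simp [extractGo]
  | cons d2 rest ih =>
    rw [extractGo]
    cases oneDiffKey d1 d2 with
    | some k => simp only [List.length_append, List.length_cons]; omega
    | none =>
      have := ih (out ++ [d2])
      simp only [List.length_append, List.length_cons, List.length_nil] at this ⊢
      omega

-- _strip_ge_bases, applied to each result the moment it is produced
def stripGE (d : List (String × Bool)) : List (String × Bool) :=
  let ge_bases : PySem.Set String := PySem.Set.ofList (((d.map Prod.fst).filter (fun k => PySem.Str.isIn "_GE" k)).map splitGE0)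
  d.filter (fun p => PySem.Str.isIn "_GE" p.1 || !(PySem.Set.contains ge_bases (splitGE0 p.1)))

def consolidate_opposites_and_remove_bases_alt (candidate_minterms : List (List (String × Bool))) : List (List (String × Bool)) :=
  match candidate_minterms with
  | [] => []
  | d1 :: rest =>
    match h : extractGo d1 [] rest with
    | (some k, rest') => stripGE (d1.filter (fun p => p.1 != k)) :: consolidate_opposites_and_remove_bases_alt rest'
    | (none, rest') => stripGE d1 :: consolidate_opposites_and_remove_bases_alt rest'
termination_by candidate_minterms.length
decreasing_by
  all_goals
    (have hb := extractGo_len d1 [] rest;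
     rw [h] at hb;
     simp only [List.length_nil, Nat.zero_add] at hb;
     simp only [List.length_cons];
     omega)

-- ===== PRECONDITION & SPEC =====
def Spec_consolidate_opposites_and_remove_bases (candidate_minterms : List (List (String × Bool))) (out : List (List (String × Bool))) : Prop := out = consolidate_opposites_and_remove_bases_alt candidate_minterms
instance (candidate_minterms : List (List (String × Bool))) (out : List (List (String × Bool))) : Decidable (Spec_consolidate_opposites_and_remove_bases candidate_minterms out) := by unfold Spec_consolidate_opposites_and_remove_bases; infer_instance

-- ===== CLAIM (what is proved, stated in full; the proofs are below) =====
def Claim_equal_consolidate_opposites_and_remove_bases : Prop := ∀ (candidate_minterms : List (List (String × Bool))), Dom_consolidate_opposites_and_remove_bases candidate_minterms → Spec_consolidate_opposites_and_remove_bases candidate_minterms (consolidate_opposites_and_remove_bases candidate_minterms)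

-- ===== LEMMAS AND PROOFS =====

-- step 1 of B without the fused cleanup (proof-only skeleton of the worklist loop)
def step1pure (l : List (List (String × Bool))) : List (List (String × Bool)) :=
  match l with
  | [] => []
  | d1 :: rest =>
    match h : extractGo d1 [] rest with
    | (some k, rest') => (d1.filter (fun p => p.1 != k)) :: step1pure rest'
    | (none, rest') => d1 :: step1pure rest'
termination_by l.length
decreasing_by
  all_goals
    (have hb := extractGo_len d1 [] rest;
     rw [h] at hb;
     simp only [List.length_nil, Nat.zero_add] at hb;
     simp only [List.length_cons];
     omega)

lemma step1pure_nil : step1pure [] = [] := by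
  rw [step1pure.eq_def]

lemma step1pure_cons_some (d1 : List (String × Bool)) (rest rest' : List (List (String × Bool))) (k : String)
    (hE : extractGo d1 [] rest = (some k, rest')) :
    step1pure (d1 :: rest) = (d1.filter (fun p => p.1 != k)) :: step1pure rest' := by
  rw [step1pure.eq_def]
  split
  · rename_i h; exact absurd h (by simp)
  · rename_i d1' rest2 h
    injection h with h1 h2
    subst h1; subst h2
    split
    · rename_i k2 rest2' hE2
      rw [hE] at hE2
      simp only [Prod.mk.injEq, Option.some.injEq] at hE2
      obtain ⟨rfl, rfl⟩ := hE2
      rfl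
    · rename_i rest2' hE2
      rw [hE] at hE2
      simp at hE2

lemma step1pure_cons_none (d1 : List (String × Bool)) (rest rest' : List (List (String × Bool)))
    (hE : extractGo d1 [] rest = (none, rest')) :
    step1pure (d1 :: rest) = d1 :: step1pure rest' := by
  rw [step1pure.eq_def]
  split
  · rename_i h; exact absurd h (by simp)
  · rename_i d1' rest2 h
    injection h with h1 h2
    subst h1; subst h2
    split
    · rename_i k2 rest2' hE2
      rw [hE] at hE2
      simp at hE2
    · rename_i rest2' hE2
      rw [hE] at hE2
      simp only [Prod.mk.injEq] at hE2
      obtain ⟨-, rfl⟩ := hE2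
      rfl

lemma alt_nil : consolidate_opposites_and_remove_bases_alt [] = [] := by
  rw [consolidate_opposites_and_remove_bases_alt.eq_def]

lemma alt_cons_some (d1 : List (String × Bool)) (rest rest' : List (List (String × Bool))) (k : String)
    (hE : extractGo d1 [] rest = (some k, rest')) :
    consolidate_opposites_and_remove_bases_alt (d1 :: rest) =
      stripGE (d1.filter (fun p => p.1 != k)) :: consolidate_opposites_and_remove_bases_alt rest' := by
  rw [consolidate_opposites_and_remove_bases_alt.eq_def]
  split
  · rename_i h; exact absurd h (by simp)
  · rename_i d1' rest2 h
    injection h with h1 h2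
    subst h1; subst h2
    split
    · rename_i k2 rest2' hE2
      rw [hE] at hE2
      simp only [Prod.mk.injEq, Option.some.injEq] at hE2
      obtain ⟨rfl, rfl⟩ := hE2
      rfl
    · rename_i rest2' hE2
      rw [hE] at hE2
      simp at hE2

lemma alt_cons_none (d1 : List (String × Bool)) (rest rest' : List (List (String × Bool)))
    (hE : extractGo d1 [] rest = (none, rest')) :
    consolidate_opposites_and_remove_bases_alt (d1 :: rest) =
      stripGE d1 :: consolidate_opposites_and_remove_bases_alt rest' := by
  rw [consolidate_opposites_and_remove_bases_alt.eq_def]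
  split
  · rename_i h; exact absurd h (by simp)
  · rename_i d1' rest2 h
    injection h with h1 h2
    subst h1; subst h2
    split
    · rename_i k2 rest2' hE2
      rw [hE] at hE2
      simp at hE2
    · rename_i rest2' hE2
      rw [hE] at hE2
      simp only [Prod.mk.injEq] at hE2
      obtain ⟨-, rfl⟩ := hE2
      rfl

-- the elements of l (indexed from j) whose index is not in the used set
def filterUsed : Nat → List (List (String × Bool)) → PySem.Set Int → List (List (String × Bool))
  | _, [], _ => []
  | j, d :: rest, used =>
    if PySem.Set.contains used (j : Int) then filterUsed (j+1) rest used
    else d :: filterUsed (j+1) rest used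

lemma contains_add_int (s : PySem.Set Int) (x y : Int) :
    PySem.Set.contains (PySem.Set.add s x) y = (PySem.Set.contains s y || decide (y = x)) := by
  have h1 := PySem.Set.contains_iff (PySem.Set.add s x) y
  have h2 := PySem.Set.contains_iff s y
  have h3 := PySem.Set.mem_add s x y
  cases hc : PySem.Set.contains s y <;> cases hd : decide (y = x) <;>
    cases he : PySem.Set.contains (PySem.Set.add s x) y <;> simp_all

lemma contains_empty_int (y : Int) :
    PySem.Set.contains (PySem.Set.empty : PySem.Set Int) y = false := by
  cases hc : PySem.Set.contains (PySem.Set.empty : PySem.Set Int) y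
  · rfl
  · exact absurd ((PySem.Set.contains_iff _ _).1 hc) (by simp [PySem.Set.empty])

lemma filterUsed_empty (j : Nat) (l : List (List (String × Bool))) : filterUsed j l PySem.Set.empty = l := by
  induction l generalizing j with
  | nil => rfl
  | cons d rest ih =>
    rw [filterUsed, contains_empty_int, if_neg Bool.false_ne_true, ih (j+1)]

lemma filterUsed_congr (l : List (List (String × Bool))) (j : Nat) (s t : PySem.Set Int)
    (h : ∀ m : Nat, j ≤ m → PySem.Set.contains s (m : Int) = PySem.Set.contains t (m : Int)) :
    filterUsed j l s = filterUsed j l t := by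
  induction l generalizing j with
  | nil => rfl
  | cons d rest ih =>
    rw [filterUsed, filterUsed, h j le_rfl, ih (j+1) (fun m hm => h m (by omega))]

lemma filterUsed_add_lt (l : List (List (String × Bool))) (j : Nat) (s : PySem.Set Int) (i : Nat) (hij : i < j) :
    filterUsed j l (PySem.Set.add s (i : Int)) = filterUsed j l s := by
  apply filterUsed_congr
  intro m hm
  rw [contains_add_int]
  have hne : ¬ ((m : Int) = (i : Int)) := by
    intro hmi
    have : m = i := by exact_mod_cast hmi
    omega
  simp [hne]

lemma innerScanA_lb (used : PySem.Set Int) (d1 : List (String × Bool)) (rest : List (List (String × Bool)))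
    (j j' : Nat) (k : String) (h : innerScanA used d1 j rest = some (j', k)) : j ≤ j' := by
  induction rest generalizing j with
  | nil => rw [innerScanA] at h; cases h
  | cons d2 rest ih =>
    rw [innerScanA] at h
    split at h
    · have := ih (j+1) h; omega
    · split at h
      · have := ih (j+1) h; omega
      · split at h
        · simp at h; omega
        · have := ih (j+1) h; omega

lemma oneDiffGo_some (d1 d2 : List (String × Bool)) (ks : List String) (k0 : String) :
    oneDiffGo d1 d2 ks (some k0) =
      if (ks.filter (fun k => dGet d1 k != dGet d2 k)).isEmpty then some k0 else none := by
  induction ks with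
  | nil => simp [oneDiffGo]
  | cons k ks ih =>
    rw [oneDiffGo]
    by_cases hp : (dGet d1 k != dGet d2 k) = true
    · simp [hp]
    · simp [hp, ih]

lemma oneDiffGo_none (d1 d2 : List (String × Bool)) (ks : List String) :
    oneDiffGo d1 d2 ks none =
      (match ks.filter (fun k => dGet d1 k != dGet d2 k) with
       | [k] => some k
       | _ => none) := by
  induction ks with
  | nil => simp [oneDiffGo]
  | cons k ks ih =>
    rw [oneDiffGo]
    by_cases hp : (dGet d1 k != dGet d2 k) = true
    · have hf : List.filter (fun k => dGet d1 k != dGet d2 k) (k :: ks) =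
          k :: List.filter (fun k => dGet d1 k != dGet d2 k) ks := by
        simp [hp]
      rw [if_pos hp, oneDiffGo_some, hf]
      cases hfk : List.filter (fun k => dGet d1 k != dGet d2 k) ks with
      | nil => rfl
      | cons a b => rfl
    · have hf : List.filter (fun k => dGet d1 k != dGet d2 k) (k :: ks) =
          List.filter (fun k => dGet d1 k != dGet d2 k) ks := by
        simp [hp]
      rw [if_neg hp, ih, hf]

lemma oneDiffKey_eq (d1 d2 : List (String × Bool)) :
    oneDiffKey d1 d2 =
      (if PySem.Set.equal (keyset d1) (keyset d2) then
        (match differingA d1 d2 with | [k] => some k | _ => none)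
      else none) := by
  rw [oneDiffKey]
  cases he : PySem.Set.equal (keyset d1) (keyset d2)
  · simp
  · simp [oneDiffGo_none, differingA]

lemma extract_none (used : PySem.Set Int) (d1 : List (String × Bool)) (rest : List (List (String × Bool)))
    (j : Nat) (out : List (List (String × Bool))) (h : innerScanA used d1 j rest = none) :
    extractGo d1 out (filterUsed j rest used) = (none, out ++ filterUsed j rest used) := by
  induction rest generalizing j out with
  | nil => simp [filterUsed, extractGo]
  | cons d2 rest ih =>
    rw [innerScanA] at h
    rw [filterUsed]
    by_cases hu : PySem.Set.contains used (j : Int) = true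
    · rw [if_pos hu] at h
      rw [if_pos hu]
      exact ih (j+1) out h
    · rw [if_neg hu] at h
      rw [if_neg hu]
      by_cases hq : PySem.Set.equal (keyset d1) (keyset d2) = true
      · rw [if_neg (by simp [hq])] at h
        cases hd : differingA d1 d2 with
        | nil =>
          rw [hd] at h
          have hnone : oneDiffKey d1 d2 = none := by rw [oneDiffKey_eq, if_pos hq, hd]
          rw [extractGo, hnone, ih (j+1) (out ++ [d2]) h]
          simp
        | cons a tl =>
          cases tl with
          | nil =>
            rw [hd] at h
            have h' : (some (j, a) : Option (Nat × String)) = none := h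
            exact absurd h' (by simp)
          | cons b tl2 =>
            rw [hd] at h
            have hnone : oneDiffKey d1 d2 = none := by rw [oneDiffKey_eq, if_pos hq, hd]
            rw [extractGo, hnone, ih (j+1) (out ++ [d2]) h]
            simp
      · rw [if_pos (by simp [hq])] at h
        have hnone : oneDiffKey d1 d2 = none := by rw [oneDiffKey_eq, if_neg hq]
        rw [extractGo, hnone, ih (j+1) (out ++ [d2]) h]
        simp

lemma extract_some (used : PySem.Set Int) (d1 : List (String × Bool)) (rest : List (List (String × Bool)))
    (j : Nat) (out : List (List (String × Bool))) (j' : Nat) (k : String)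
    (h : innerScanA used d1 j rest = some (j', k)) :
    extractGo d1 out (filterUsed j rest used) = (some k, out ++ filterUsed j rest (PySem.Set.add used (j' : Int))) := by
  induction rest generalizing j out with
  | nil => rw [innerScanA] at h; cases h
  | cons d2 rest ih =>
    rw [innerScanA] at h
    rw [filterUsed]
    conv_rhs => rw [filterUsed]
    by_cases hu : PySem.Set.contains used (j : Int) = true
    · have hu' : PySem.Set.contains (PySem.Set.add used (j' : Int)) (j : Int) = true := by
        rw [contains_add_int, hu]; simp
      rw [if_pos hu] at h
      rw [if_pos hu, if_pos hu']
      exact ih (j+1) out h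
    · have hu0 : PySem.Set.contains used (j : Int) = false := Bool.eq_false_iff.mpr hu
      rw [if_neg hu] at h
      rw [if_neg hu]
      by_cases hq : PySem.Set.equal (keyset d1) (keyset d2) = true
      · rw [if_neg (by simp [hq])] at h
        cases hd : differingA d1 d2 with
        | nil =>
          rw [hd] at h
          have hrec : innerScanA used d1 (j+1) rest = some (j', k) := h
          have hj : j + 1 ≤ j' := innerScanA_lb used d1 rest (j+1) j' k hrec
          have hne : ¬ ((j : Int) = (j' : Int)) := by
            intro hmi
            have : j = j' := by exact_mod_cast hmi
            omega
          have hu' : PySem.Set.contains (PySem.Set.add used (j' : Int)) (j : Int) = false := by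
            rw [contains_add_int, hu0]
            simp [hne]
          rw [if_neg (by rw [hu']; exact Bool.false_ne_true)]
          have hnone : oneDiffKey d1 d2 = none := by rw [oneDiffKey_eq, if_pos hq, hd]
          rw [extractGo, hnone, ih (j+1) (out ++ [d2]) hrec]
          simp
        | cons a tl =>
          cases tl with
          | nil =>
            rw [hd] at h
            have h' : (some (j, a) : Option (Nat × String)) = some (j', k) := h
            simp only [Option.some.injEq, Prod.mk.injEq] at h'
            obtain ⟨rfl, rfl⟩ := h'
            have hsome : oneDiffKey d1 d2 = some a := by rw [oneDiffKey_eq, if_pos hq, hd]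
            have hu' : PySem.Set.contains (PySem.Set.add used (j : Int)) (j : Int) = true := by
              rw [contains_add_int]; simp
            rw [if_pos hu']
            rw [extractGo, hsome]
            rw [filterUsed_add_lt rest (j+1) used j (by omega)]
          | cons b tl2 =>
            rw [hd] at h
            have hrec : innerScanA used d1 (j+1) rest = some (j', k) := h
            have hj : j + 1 ≤ j' := innerScanA_lb used d1 rest (j+1) j' k hrec
            have hne : ¬ ((j : Int) = (j' : Int)) := by
              intro hmi
              have : j = j' := by exact_mod_cast hmi
              omega
            have hu' : PySem.Set.contains (PySem.Set.add used (j' : Int)) (j : Int) = false := by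
              rw [contains_add_int, hu0]
              simp [hne]
            rw [if_neg (by rw [hu']; exact Bool.false_ne_true)]
            have hnone : oneDiffKey d1 d2 = none := by rw [oneDiffKey_eq, if_pos hq, hd]
            rw [extractGo, hnone, ih (j+1) (out ++ [d2]) hrec]
            simp
      · rw [if_pos (by simp [hq])] at h
        have hrec : innerScanA used d1 (j+1) rest = some (j', k) := h
        have hj : j + 1 ≤ j' := innerScanA_lb used d1 rest (j+1) j' k hrec
        have hne : ¬ ((j : Int) = (j' : Int)) := by
          intro hmi
          have : j = j' := by exact_mod_cast hmi
          omega
        have hu' : PySem.Set.contains (PySem.Set.add used (j' : Int)) (j : Int) = false := by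
          rw [contains_add_int, hu0]
          simp [hne]
        rw [if_neg (by rw [hu']; exact Bool.false_ne_true)]
        have hnone : oneDiffKey d1 d2 = none := by rw [oneDiffKey_eq, if_neg hq]
        rw [extractGo, hnone, ih (j+1) (out ++ [d2]) hrec]
        simp

lemma outerA_eq_step1pure (rest : List (List (String × Bool))) (i : Nat) (used : PySem.Set Int) :
    outerA i rest used = step1pure (filterUsed i rest used) := by
  induction rest generalizing i used with
  | nil => rw [outerA, filterUsed, step1pure_nil]
  | cons d1 rest ih =>
    rw [outerA, filterUsed]
    by_cases hu : PySem.Set.contains used (i : Int) = true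
    · rw [if_pos hu, if_pos hu]
      exact ih (i+1) used
    · rw [if_neg hu, if_neg hu]
      cases hs : innerScanA used d1 (i+1) rest with
      | none =>
        have he := extract_none used d1 rest (i+1) [] hs
        rw [List.nil_append] at he
        rw [step1pure_cons_none d1 _ _ he, ih (i+1) used]
      | some jk =>
        obtain ⟨j, k⟩ := jk
        have he := extract_some used d1 rest (i+1) [] j k hs
        rw [List.nil_append] at he
        rw [step1pure_cons_some d1 _ _ k he]
        change (d1.filter (fun p => p.1 != k)) :: outerA (i+1) rest (PySem.Set.add (PySem.Set.add used (i : Int)) (j : Int)) = _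
        have hfc : filterUsed (i+1) rest (PySem.Set.add (PySem.Set.add used (i : Int)) (j : Int)) =
            filterUsed (i+1) rest (PySem.Set.add used (j : Int)) := by
          apply filterUsed_congr
          intro m hm
          rw [contains_add_int, contains_add_int, contains_add_int]
          have hne : ¬ ((m : Int) = (i : Int)) := by
            intro hmi
            have : m = i := by exact_mod_cast hmi
            omega
          simp [hne]
        rw [ih (i+1) (PySem.Set.add (PySem.Set.add used (i : Int)) (j : Int)), hfc]

lemma cleanA_eq_stripGE (d : List (String × Bool)) : cleanA d = stripGE d := by
  simp only [cleanA, stripGE]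
  exact List.filter_congr (fun p _ => Bool.or_comm _ _)

lemma alt_eq_map (l : List (List (String × Bool))) :
    consolidate_opposites_and_remove_bases_alt l = (step1pure l).map stripGE := by
  induction l using consolidate_opposites_and_remove_bases_alt.induct with
  | case1 => rw [alt_nil, step1pure_nil]; rfl
  | case2 d1 rest k rest' h ih =>
    rw [alt_cons_some d1 rest rest' k h, step1pure_cons_some d1 rest rest' k h]
    simp [ih]
  | case3 d1 rest rest' h ih =>
    rw [alt_cons_none d1 rest rest' h, step1pure_cons_none d1 rest rest' h]
    simp [ih]

-- ===== VERDICT (by name: the statement is the Claim_ definition above) =====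
theorem consolidate_opposites_and_remove_bases_spec : Claim_equal_consolidate_opposites_and_remove_bases := by
  intro l _
  unfold Spec_consolidate_opposites_and_remove_bases
  rw [consolidate_opposites_and_remove_bases, alt_eq_map, outerA_eq_step1pure, filterUsed_empty]
  exact List.map_congr_left (fun d _ => cleanA_eq_stripGE d)
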